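-- pv_equiv track=rewrite | github.com/gnsoares/UNICAMP_MC102_ProgrammingIntro | lab16/lab16.py | pagsResposta
-- ===== SOURCE A (Python) =====
-- def pagsResposta(palavrasPagina, termosBusca):
-- 	pR = []
-- 	# Para cada pagina cada termo de busca e checado:
-- 	#	Se um dos termos de busca nao estiver presente, o valor na lista de retorno dessa pagina = 0 e nao sao conferidos os proximos termos
-- 	#	Se todos os termos estiverem presentes, o valor na lista de retorno dessa pagina = 1
-- 	for i in palavrasPagina:
-- 		for j in termosBusca:
-- 			if not(j in i.split()):
-- 				pR.append(0)
-- 				break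
-- 		else:
-- 			pR.append(1)
-- 	return [_ for _ in pR]
-- ===== SOURCE B (Python) =====
-- def pagsResposta(palavrasPagina, termosBusca):
--     # Inverted index: word -> set of page indices containing it
--     index = {}
--     for k, page in enumerate(palavrasPagina):
--         for w in page.split():
--             index.setdefault(w, set()).add(k)
--     # Intersect the posting sets of all search terms
--     ans = set(range(len(palavrasPagina)))
--     for t in termosBusca:
--         ans &= index.get(t, set())
--     return [1 if k in ans else 0 for k in range(len(palavrasPagina))]
-- ===== Notes on version B (the rewrite author's own statement) =====
-- stated objective: alternative
-- what changed: Replaced the per-page scan over all terms (re-splitting the page for every term) by an inverted index word->set of page indices built in one pass, then intersecting the posting sets of the terms and emitting 0/1 per page index.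
import Mathlib
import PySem

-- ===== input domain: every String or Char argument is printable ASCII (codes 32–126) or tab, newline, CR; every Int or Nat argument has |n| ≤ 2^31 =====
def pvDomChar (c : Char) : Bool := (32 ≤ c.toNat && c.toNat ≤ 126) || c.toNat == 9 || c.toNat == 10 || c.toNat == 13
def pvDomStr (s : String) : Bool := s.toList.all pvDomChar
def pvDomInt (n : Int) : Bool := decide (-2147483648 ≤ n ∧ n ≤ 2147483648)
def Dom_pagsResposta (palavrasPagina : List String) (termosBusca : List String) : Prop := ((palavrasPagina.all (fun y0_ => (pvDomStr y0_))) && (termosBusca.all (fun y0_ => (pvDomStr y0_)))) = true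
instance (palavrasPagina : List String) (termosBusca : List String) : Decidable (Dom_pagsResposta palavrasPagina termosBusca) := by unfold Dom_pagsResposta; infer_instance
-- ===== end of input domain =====

-- B replaces A's per-page scan over all terms by an inverted index (word -> set of page
-- indices) intersected over the terms; equivalence of return values is proved below.

-- ===== PORT A =====
-- inner 'for j in termosBusca: if not (j in i.split()): append 0; break / else: append 1'
def pvLoopA (i : String) : List String → Int
  | [] => 1
  | j :: rest => if ¬ (j ∈ PySem.Str.split₀ i) then 0 else pvLoopA i rest

def pagsResposta (palavrasPagina : List String) (termosBusca : List String) : List Int :=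
  let pR := palavrasPagina.foldl (fun acc i => acc ++ [pvLoopA i termosBusca]) []
  pR.map (fun x => x)

-- ===== PORT B =====
-- index = {}; for k, page in enumerate(pages): for w in page.split(): index.setdefault(w, set()).add(k)
def pvIndex (palavrasPagina : List String) : PySem.Dict String (PySem.Set Int) :=
  (PySem.List.enumerate palavrasPagina 0).foldl
    (fun d kp => (PySem.Str.split₀ kp.2).foldl
      (fun d w => d.insert w (PySem.Set.add (d.getD w []) kp.1)) d)
    PySem.Dict.empty

def pagsResposta_alt (palavrasPagina : List String) (termosBusca : List String) : List Int :=
  let index := pvIndex palavrasPagina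
  let ans := termosBusca.foldl
      (fun s t => PySem.Set.inter s (index.getD t []))
      (PySem.Set.ofList (PySem.List.pyRange 0 (palavrasPagina.length : Int) 1))
  (PySem.List.pyRange 0 (palavrasPagina.length : Int) 1).map
    (fun k => if PySem.Set.contains ans k then 1 else 0)

-- ===== PRECONDITION & SPEC =====
def Spec_pagsResposta (palavrasPagina : List String) (termosBusca : List String) (out : List Int) : Prop := out = pagsResposta_alt palavrasPagina termosBusca
instance (palavrasPagina : List String) (termosBusca : List String) (out : List Int) : Decidable (Spec_pagsResposta palavrasPagina termosBusca out) := by unfold Spec_pagsResposta; infer_instance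

-- ===== CLAIM (what is proved, stated in full; the proofs are below) =====
def Claim_equal_pagsResposta : Prop := ∀ (palavrasPagina : List String) (termosBusca : List String), Dom_pagsResposta palavrasPagina termosBusca → Spec_pagsResposta palavrasPagina termosBusca (pagsResposta palavrasPagina termosBusca)

-- ===== LEMMAS AND PROOFS =====

-- A's per-page value is 1 iff every term occurs in the page's word list
theorem pvLoopA_eq (i : String) (ts : List String) :
    pvLoopA i ts = if ∀ t ∈ ts, t ∈ PySem.Str.split₀ i then (1 : Int) else 0 := by
  induction ts with
  | nil => simp [pvLoopA]
  | cons j rest ih =>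
    simp only [pvLoopA, ih]
    by_cases h : j ∈ PySem.Str.split₀ i
    · simp [h]
    · simp [h]

-- membership in one page's contribution to the index
theorem pvInner_mem (ws : List String) (d : PySem.Dict String (PySem.Set Int)) (iIdx : Int)
    (t : String) (k : Int) :
    k ∈ (ws.foldl (fun d w => d.insert w (PySem.Set.add (d.getD w []) iIdx)) d).getD t [] ↔
      k ∈ d.getD t [] ∨ (t ∈ ws ∧ k = iIdx) := by
  induction ws generalizing d with
  | nil => simp
  | cons w rest ih =>
    simp only [List.foldl_cons, ih, PySem.Dict.getD_insert]
    by_cases h : t = w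
    · subst h
      simp [PySem.Set.mem_add]
      tauto
    · simp [h]

-- membership in the full index fold
theorem pvIndexAux_mem (pages : List String) (s : Int) (d : PySem.Dict String (PySem.Set Int))
    (t : String) (k : Int) :
    k ∈ ((PySem.List.enumerate pages s).foldl
        (fun d kp => (PySem.Str.split₀ kp.2).foldl
          (fun d w => d.insert w (PySem.Set.add (d.getD w []) kp.1)) d) d).getD t [] ↔
      k ∈ d.getD t [] ∨ ∃ j : Nat, ∃ h : j < pages.length, k = s + j ∧ t ∈ PySem.Str.split₀ pages[j] := by
  induction pages generalizing s d with
  | nil => simp [PySem.List.enumerate_nil]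
  | cons p rest ih =>
    rw [PySem.List.enumerate_cons]
    simp only [List.foldl_cons, ih, pvInner_mem]
    constructor
    · rintro (((hd | ⟨ht, rfl⟩) ) | ⟨j, hj, rfl, hmem⟩)
      · exact Or.inl hd
      · exact Or.inr ⟨0, by simp, by simp, by simpa⟩
      · exact Or.inr ⟨j + 1, by simpa using hj, by push_cast; ring, by simpa using hmem⟩
    · rintro (hd | ⟨j, hj, rfl, hmem⟩)
      · exact Or.inl (Or.inl hd)
      · cases j with
        | zero => exact Or.inl (Or.inr ⟨by simpa using hmem, by simp⟩)
        | succ m =>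
          exact Or.inr ⟨m, by simpa using hj, by push_cast; ring, by simpa using hmem⟩

theorem pvIndex_mem (pages : List String) (t : String) (k : Int) :
    k ∈ (pvIndex pages).getD t [] ↔
      ∃ j : Nat, ∃ h : j < pages.length, k = j ∧ t ∈ PySem.Str.split₀ pages[j] := by
  have h := pvIndexAux_mem pages 0 PySem.Dict.empty t k
  simpa [pvIndex] using h

-- membership in the intersection fold
theorem pvInterFold_mem (ts : List String) (f : String → PySem.Set Int) (s0 : List Int) (k : Int) :
    k ∈ ts.foldl (fun s t => PySem.Set.inter s (f t)) s0 ↔ k ∈ s0 ∧ ∀ t ∈ ts, k ∈ f t := by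
  induction ts generalizing s0 with
  | nil => simp
  | cons t rest ih =>
    simp only [List.foldl_cons, ih, PySem.Set.mem_inter]
    constructor
    · rintro ⟨⟨hs, hf⟩, hrest⟩
      refine ⟨hs, fun u hu => ?_⟩
      rcases List.mem_cons.1 hu with rfl | hu
      · exact hf
      · exact hrest u hu
    · rintro ⟨hs, hall⟩
      exact ⟨⟨hs, hall t (by simp)⟩, fun u hu => hall u (by simp [hu])⟩

-- ===== VERDICT (by name: the statement is the Claim_ definition above) =====
theorem pagsResposta_spec : Claim_equal_pagsResposta := by
  intro pages terms _
  unfold Spec_pagsResposta pagsResposta pagsResposta_alt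
  rw [PySem.List.foldl_append_singleton_eq_map, List.nil_append, List.map_id_fun',
    PySem.List.pyRange_zero_natCast,
    PySem.Set.ofList_eq_self_of_nodup _
      (List.nodup_range.map (fun a b h => by exact_mod_cast h))]
  rw [List.map_map]
  apply List.ext_getElem
  · simp
  · intro i h1 h2
    have hi : i < pages.length := by simpa using h1
    simp only [id_eq, List.getElem_map, List.getElem_range, Function.comp_apply]
    rw [pvLoopA_eq]
    have hiff : ((i : Int) ∈ terms.foldl (fun s t => PySem.Set.inter s ((pvIndex pages).getD t []))
        (List.map (fun k : Nat => (k : Int)) (List.range pages.length))) ↔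
        (∀ t ∈ terms, t ∈ PySem.Str.split₀ (pages[i]'hi)) := by
      rw [pvInterFold_mem]
      constructor
      · rintro ⟨-, hall⟩ t ht
        rcases (pvIndex_mem pages t i).1 (hall t ht) with ⟨j, hj, hij, hmem'⟩
        have : j = i := by exact_mod_cast hij.symm
        subst this; exact hmem'
      · intro hall
        refine ⟨List.mem_map_of_mem (List.mem_range.2 hi), fun t ht =>
          (pvIndex_mem pages t i).2 ⟨i, hi, rfl, hall t ht⟩⟩
    rw [show (PySem.Set.contains
        (terms.foldl (fun s t => PySem.Set.inter s ((pvIndex pages).getD t []))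
          (List.map (fun k : Nat => (k : Int)) (List.range pages.length))) (i : Int)) =
        decide ((i : Int) ∈ terms.foldl (fun s t => PySem.Set.inter s ((pvIndex pages).getD t []))
          (List.map (fun k : Nat => (k : Int)) (List.range pages.length))) from by
      simp [PySem.Set.contains_eq_listContains]]
    by_cases hcase : ∀ t ∈ terms, t ∈ PySem.Str.split₀ (pages[i]'hi)
    · simp [hiff.2 hcase]
      exact hcase
    · have : ¬ ((i : Int) ∈ terms.foldl (fun s t => PySem.Set.inter s ((pvIndex pages).getD t []))
          (List.map (fun k : Nat => (k : Int)) (List.range pages.length))) :=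
        fun hm => hcase (hiff.1 hm)
      simp [hcase, this]
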